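-- pv_equiv track=rewrite | github.com/Elie224/agrox | app.py | has_critical_anomaly
-- ===== SOURCE A (Python) =====
-- def has_critical_anomaly(anomalies):
--     if not anomalies:
--         return False
--     critical_tokens = [
--         "suspecte",
--         "anormalement",
--         "incoherence",
--         "hors plage",
--     ]
--     for item in anomalies:
--         text = str(item).lower()
--         if any(token in text for token in critical_tokens):
--             return True
--     return False
-- ===== SOURCE B (Python) =====
-- def has_critical_anomaly(anomalies):
--     if not anomalies:
--         return False
--     critical_tokens = [
--         "suspecte",
--         "anormalement",
--         "incoherence",
--         "hors plage",
--     ]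
--     combined = "\n".join(str(item).lower() for item in anomalies)
--     return any(token in combined for token in critical_tokens)
-- ===== Notes on version B (the rewrite author's own statement) =====
-- stated objective: alternative
-- what changed: Instead of looping over items and testing every token inside each item, B joins all lowercased items into one newline-separated string and then tests each token once over that combined text (safe because no token contains a newline).
import Mathlib
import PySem

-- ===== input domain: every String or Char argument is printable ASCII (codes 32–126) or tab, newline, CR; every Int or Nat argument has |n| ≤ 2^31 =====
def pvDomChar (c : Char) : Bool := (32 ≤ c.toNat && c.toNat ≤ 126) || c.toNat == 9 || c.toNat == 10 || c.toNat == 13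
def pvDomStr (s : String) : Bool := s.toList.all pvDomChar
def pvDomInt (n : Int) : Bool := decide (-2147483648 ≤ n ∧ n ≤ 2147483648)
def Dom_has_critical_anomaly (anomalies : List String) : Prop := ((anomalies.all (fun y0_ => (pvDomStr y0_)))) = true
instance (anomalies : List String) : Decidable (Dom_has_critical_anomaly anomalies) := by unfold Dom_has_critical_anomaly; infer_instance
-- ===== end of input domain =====

-- B joins all lowercased items into one newline-separated text and tests each token once against it,
-- instead of A's per-item loop testing every token inside each item (objective: alternative decomposition).

def pvCriticalTokens : List String := ["suspecte", "anormalement", "incoherence", "hors plage"]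

-- ===== PORT A =====
-- A's 'for item in anomalies: … return True' early-exit loop
def pvLoopA : List String → Bool
  | [] => false
  | item :: rest =>
    if pvCriticalTokens.any (fun token => PySem.Str.isIn token (PySem.Str.lower item)) then true
    else pvLoopA rest

def has_critical_anomaly (anomalies : List String) : Bool :=
  if anomalies.isEmpty then false
  else pvLoopA anomalies

-- ===== PORT B =====
def has_critical_anomaly_alt (anomalies : List String) : Bool :=
  if anomalies.isEmpty then false
  else
    let combined := PySem.Str.join "\n" (anomalies.map PySem.Str.lower)
    pvCriticalTokens.any (fun token => PySem.Str.isIn token combined)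

-- ===== PRECONDITION & SPEC =====
def Spec_has_critical_anomaly (anomalies : List String) (out : Bool) : Prop := out = has_critical_anomaly_alt anomalies
instance (anomalies : List String) (out : Bool) : Decidable (Spec_has_critical_anomaly anomalies out) := by unfold Spec_has_critical_anomaly; infer_instance

-- ===== CLAIM (what is proved, stated in full; the proofs are below) =====
def Claim_equal_has_critical_anomaly : Prop := ∀ (anomalies : List String), Dom_has_critical_anomaly anomalies → Spec_has_critical_anomaly anomalies (has_critical_anomaly anomalies)

-- ===== LEMMAS AND PROOFS =====

-- a prefix of a ++ c :: b that avoids c is a prefix of a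
theorem pv_prefix_avoid {α : Type} (sub : List α) :
    ∀ (a : List α) {c : α} {b : List α}, sub <+: a ++ c :: b → c ∉ sub → sub <+: a := by
  induction sub with
  | nil => intro a c b _ _; exact List.nil_prefix
  | cons y sub' ih =>
    intro a c b hpre hnot
    cases a with
    | nil =>
      obtain ⟨t, ht⟩ := hpre
      simp at ht
      exact absurd (ht.1 ▸ List.mem_cons_self) hnot
    | cons z a' =>
      obtain ⟨t, ht⟩ := hpre
      simp at ht
      obtain ⟨hy, hrest⟩ := ht
      have h' : sub' <+: a' ++ c :: b := ⟨t, hrest⟩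
      have := ih a' h' (fun hm => hnot (List.mem_cons_of_mem _ hm))
      exact hy ▸ List.cons_prefix_cons.mpr ⟨rfl, this⟩

-- an infix of a ++ c :: b that avoids c lies entirely in a or entirely in b
theorem pv_infix_avoid {α : Type} {sub : List α} {c : α} :
    ∀ (a : List α) {b : List α}, sub <:+: a ++ c :: b → c ∉ sub → sub <:+: a ∨ sub <:+: b := by
  intro a
  induction a with
  | nil =>
    intro b h hnot
    rcases List.infix_cons_iff.mp h with hp | hi
    · have : sub <+: ([] : List α) := pv_prefix_avoid sub [] hp hnot
      simp at this
      exact Or.inr (this ▸ List.nil_infix)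
    · exact Or.inr hi
  | cons x a' ih =>
    intro b h hnot
    rcases List.infix_cons_iff.mp h with hp | hi
    · exact Or.inl (pv_prefix_avoid sub (x :: a') hp hnot).isInfix
    · rcases ih hi hnot with h1 | h2
      · exact Or.inl (h1.trans (List.suffix_cons x a').isInfix)
      · exact Or.inr h2

-- every part is an infix of the join
theorem pv_part_infix_join (sep : List Char) :
    ∀ (ls : List (List Char)) (l : List Char), l ∈ ls → l <:+: PySem.Chars.join sep ls := by
  intro ls
  induction ls with
  | nil => intro l h; exact absurd h (List.not_mem_nil)
  | cons p t ih =>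
    intro l h
    cases t with
    | nil =>
      simp at h
      rw [h, PySem.Chars.join_singleton]
    | cons q t' =>
      rw [PySem.Chars.join_cons_cons]
      rcases List.mem_cons.mp h with h1 | h2
      · exact h1 ▸ ((List.prefix_append p sep).isInfix.trans (List.prefix_append _ _).isInfix)
      · have := ih l h2
        exact this.trans (List.suffix_append _ _).isInfix

-- a nonempty token avoiding the separator is in the join iff it is in some part
theorem pv_token_in_join {tok : List Char} {sep : Char} (hne : tok ≠ []) (hsep : sep ∉ tok) :
    ∀ (ls : List (List Char)), tok <:+: PySem.Chars.join [sep] ls ↔ ∃ l ∈ ls, tok <:+: l := by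
  intro ls
  induction ls with
  | nil =>
    rw [PySem.Chars.join_nil]
    simp [List.infix_nil, hne]
  | cons p t ih =>
    cases t with
    | nil =>
      rw [PySem.Chars.join_singleton]
      simp
    | cons q t' =>
      rw [PySem.Chars.join_cons_cons]
      constructor
      · intro h
        have h' : tok <:+: p ++ sep :: PySem.Chars.join [sep] (q :: t') := by
          simpa using h
        rcases pv_infix_avoid p h' hsep with h1 | h2
        · exact ⟨p, List.mem_cons_self, h1⟩
        · obtain ⟨l, hl, hil⟩ := ih.mp h2
          exact ⟨l, List.mem_cons_of_mem _ hl, hil⟩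
      · intro ⟨l, hl, hil⟩
        have := hil.trans (pv_part_infix_join [sep] (p :: q :: t') l hl)
        rwa [PySem.Chars.join_cons_cons] at this

-- A's early-exit loop is List.any
theorem pv_loopA_eq_any (xs : List String) :
    pvLoopA xs = xs.any (fun item => pvCriticalTokens.any (fun token => PySem.Str.isIn token (PySem.Str.lower item))) := by
  induction xs with
  | nil => rfl
  | cons x t ih =>
    have hdef : pvLoopA (x :: t) =
        if pvCriticalTokens.any (fun token => PySem.Str.isIn token (PySem.Str.lower x)) then true
        else pvLoopA t := rfl
    rw [hdef, List.any_cons, ← ih]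
    cases hc : pvCriticalTokens.any (fun token => PySem.Str.isIn token (PySem.Str.lower x)) <;>
      simp

theorem pv_main (anomalies : List String) :
    has_critical_anomaly anomalies = has_critical_anomaly_alt anomalies := by
  unfold has_critical_anomaly has_critical_anomaly_alt
  split_ifs with h
  · rfl
  · rw [pv_loopA_eq_any]
    apply Bool.eq_iff_iff.mpr
    simp only [List.any_eq_true]
    constructor
    · intro ⟨item, hitem, tok, htok, hin⟩
      refine ⟨tok, htok, ?_⟩
      rw [PySem.Str.isIn_iff_infix] at hin ⊢
      rw [PySem.Str.toList_join]
      have hne : tok.toList ≠ [] := by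
        fin_cases htok <;> decide
      have hsep : '\n' ∉ tok.toList := by
        fin_cases htok <;> decide
      rw [show ("\n" : String).toList = ['\n'] from rfl]
      rw [pv_token_in_join hne hsep]
      exact ⟨(PySem.Str.lower item).toList, by
        simp only [List.map_map]
        exact List.mem_map.mpr ⟨item, hitem, rfl⟩, hin⟩
    · intro ⟨tok, htok, hin⟩
      rw [PySem.Str.isIn_iff_infix, PySem.Str.toList_join,
        show ("\n" : String).toList = ['\n'] from rfl] at hin
      have hne : tok.toList ≠ [] := by
        fin_cases htok <;> decide
      have hsep : '\n' ∉ tok.toList := by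
        fin_cases htok <;> decide
      rw [pv_token_in_join hne hsep] at hin
      obtain ⟨l, hl, hil⟩ := hin
      simp only [List.map_map, List.mem_map] at hl
      obtain ⟨item, hitem, rfl⟩ := hl
      exact ⟨item, hitem, tok, htok, (PySem.Str.isIn_iff_infix _ _).mpr hil⟩

-- ===== VERDICT (by name: the statement is the Claim_ definition above) =====
theorem has_critical_anomaly_spec : Claim_equal_has_critical_anomaly := by
  intro anomalies _
  exact pv_main anomalies
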